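-- pv_equiv track=rewrite | github.com/unoplat/unoplat-code-confluence | unoplat-code-confluence-ingestion/code-confluence-flow-bridge/src/code_confluence_flow_bridge/engine/programming_language/python/python_tree_sitter_framework_detector.py | _is_feature_imported
-- ===== SOURCE A (Python) =====
-- from typing import Dict, List, Literal, Optional
--
-- def _is_feature_imported(
--     absolute_paths: List[str], import_aliases: Dict[str, str]
-- ) -> bool:
--     """Check whether any of a feature's absolute import paths appear in the file's recorded imports.
--
--     Args:
--         absolute_paths: Fully-qualified dotted paths for the feature
--             (e.g. ``["flask.Flask", "flask.app.Flask"]``).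
--         import_aliases: Mapping of dotted import path to the local alias
--             present in the source file.
--
--     Returns:
--         True if at least one absolute path (or any leading prefix of it)
--         is found in *import_aliases*.
--     """
--     for absolute_path in absolute_paths:
--         if absolute_path in import_aliases:
--             return True
--         # Check progressively longer prefixes (e.g. "flask", "flask.app")
--         # so that `import flask` still matches feature path "flask.Flask".
--         parts = absolute_path.split(".")
--         for idx in range(1, len(parts)):
--             prefix = ".".join(parts[:idx])
--             if prefix in import_aliases:
--                 return True
--     return False
-- ===== SOURCE B (Python) =====
-- from typing import Dict, List
--
-- def _is_feature_imported(
--     absolute_paths: List[str], import_aliases: Dict[str, str]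
-- ) -> bool:
--     """Scan the recorded import keys directly: a path matches a key if it is
--     equal to it or extends it past a dot boundary (so 'flask' matches
--     'flask.Flask' but not 'flaskX')."""
--     return any(
--         path == key or path.startswith(key + ".")
--         for path in absolute_paths
--         for key in import_aliases
--     )
-- ===== Notes on version B (the rewrite author's own statement) =====
-- stated objective: idiomatic
-- what changed: Instead of splitting each path into dot-separated segments and generating progressively longer dotted prefixes to look up in the dict, B scans the alias keys directly and tests 'path == key or path.startswith(key + ".")', which enforces the same dot-boundary semantics with a single string prefix test per key.
import Mathlib
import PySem

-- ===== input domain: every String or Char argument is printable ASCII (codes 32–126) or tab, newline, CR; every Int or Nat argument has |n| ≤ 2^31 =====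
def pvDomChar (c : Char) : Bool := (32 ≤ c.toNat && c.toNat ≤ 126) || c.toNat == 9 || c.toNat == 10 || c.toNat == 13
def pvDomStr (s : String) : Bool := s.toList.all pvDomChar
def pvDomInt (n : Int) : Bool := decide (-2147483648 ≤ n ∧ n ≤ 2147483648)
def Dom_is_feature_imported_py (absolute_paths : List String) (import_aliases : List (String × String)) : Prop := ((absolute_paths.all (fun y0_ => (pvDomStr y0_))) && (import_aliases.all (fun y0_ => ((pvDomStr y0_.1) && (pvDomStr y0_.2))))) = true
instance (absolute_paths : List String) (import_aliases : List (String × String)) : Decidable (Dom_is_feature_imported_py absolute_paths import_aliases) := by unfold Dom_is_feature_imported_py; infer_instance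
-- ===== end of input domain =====

-- ===== PORT A =====
-- B changes only the matching strategy (key-scan + dotted startswith instead of
-- generated dotted prefixes looked up in the dict); same results, similar cost.

-- 'k in dict' on the association-list representation: some pair has key k
def pyDictContains (d : List (String × String)) (k : String) : Bool :=
  d.any (fun kv => kv.1 == k)

def is_feature_imported_py (absolute_paths : List String) (import_aliases : List (String × String)) : Bool :=
  absolute_paths.any (fun absolute_path =>
    pyDictContains import_aliases absolute_path ||
    -- parts = absolute_path.split(".")  (sep "." is the literal ['.'])
    (let parts : List String := (PySem.Chars.splitOn absolute_path.toList ['.']).map String.ofList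
     (PySem.List.pyRange 1 (parts.length : Int) 1).any (fun idx =>
       -- prefix = ".".join(parts[:idx])
       pyDictContains import_aliases (PySem.Str.join "." (PySem.List.slice parts none (some idx))))))

-- ===== PORT B =====
def is_feature_imported_py_alt (absolute_paths : List String) (import_aliases : List (String × String)) : Bool :=
  absolute_paths.any (fun path =>
    import_aliases.any (fun kv =>
      path == kv.1 || PySem.Str.startswith path (kv.1 ++ ".")))

-- ===== PRECONDITION & SPEC =====
def Spec_is_feature_imported_py (absolute_paths : List String) (import_aliases : List (String × String)) (out : Bool) : Prop := out = is_feature_imported_py_alt absolute_paths import_aliases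
instance (absolute_paths : List String) (import_aliases : List (String × String)) (out : Bool) : Decidable (Spec_is_feature_imported_py absolute_paths import_aliases out) := by unfold Spec_is_feature_imported_py; infer_instance

-- ===== CLAIM (what is proved, stated in full; the proofs are below) =====
def Claim_equal_is_feature_imported_py : Prop := ∀ (absolute_paths : List String) (import_aliases : List (String × String)), Dom_is_feature_imported_py absolute_paths import_aliases → Spec_is_feature_imported_py absolute_paths import_aliases (is_feature_imported_py absolute_paths import_aliases)

-- ===== LEMMAS AND PROOFS =====

theorem pysem_splitOn_go_eq (fuel : Nat) (l cur : List Char) (acc : List (List Char)) (h : l.length ≤ fuel) :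
    PySem.Chars.splitOn.go ['.'] fuel l cur acc
      = acc.reverse ++ (l.splitOn '.').modifyHead (cur.reverse ++ ·) := by
  induction fuel generalizing l cur acc with
  | zero =>
    interval_cases hl : l.length
    · cases l with
      | nil => simp [PySem.Chars.splitOn.go, List.splitOn, List.splitOnP, List.splitOnP.go]
      | cons a t => simp at hl
  | succ n ih =>
    cases l with
    | nil => simp [PySem.Chars.splitOn.go, List.splitOn, List.splitOnP, List.splitOnP.go]
    | cons c rest =>
      rw [PySem.Chars.splitOn.go]
      by_cases hc : c = '.'
      · subst hc
        rw [if_pos (by simp [List.isPrefixOf])]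
        rw [ih _ _ _ (by simpa using Nat.le_of_succ_le_succ (by simpa using h))]
        simp [List.splitOn, List.splitOnP_cons]
        show List.modifyHead id _ = _
        rw [List.modifyHead_id]
        rfl
      · rw [if_neg (by simp [List.isPrefixOf]; exact fun hh => hc hh.symm)]
        rw [ih _ _ _ (by simpa using Nat.le_of_succ_le_succ (by simpa using h))]
        simp only [List.splitOn, List.splitOnP_cons]
        rw [if_neg (by simp [hc])]
        rw [List.modifyHead_modifyHead]
        have hf : (fun x => (c :: cur).reverse ++ x) = ((fun x => cur.reverse ++ x) ∘ List.cons c) := by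
          funext x; simp
        rw [hf]

theorem pysem_splitOn_eq (l : List Char) :
    PySem.Chars.splitOn l ['.'] = l.splitOn '.' := by
  rw [PySem.Chars.splitOn, pysem_splitOn_go_eq _ _ _ _ (Nat.le_succ _)]
  simp
  show List.modifyHead id _ = _
  rw [List.modifyHead_id]
  rfl

theorem intercalate_append_nonempty (x : Char) (as bs : List (List Char))
    (ha : as ≠ []) (hb : bs ≠ []) :
    [x].intercalate (as ++ bs) = [x].intercalate as ++ x :: [x].intercalate bs := by
  induction as with
  | nil => exact absurd rfl ha
  | cons a as ih =>
    cases as with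
    | nil =>
      cases bs with
      | nil => exact absurd rfl hb
      | cons b bs => simp [List.intercalate, List.intersperse]
    | cons a' as' =>
      have h1 : [x].intercalate (a :: (a' :: as') ++ bs) = a ++ x :: [x].intercalate ((a' :: as') ++ bs) := by
        simp [List.intercalate]
      have h2 : [x].intercalate (a :: a' :: as') = a ++ x :: [x].intercalate (a' :: as') := by
        simp [List.intercalate, List.intersperse]
      rw [h1, ih (by simp), h2]
      simp

theorem core_prefix_iff (l m : List Char) :
    (∃ i : Nat, 1 ≤ i ∧ i < (l.splitOn '.').length ∧
        m = [('.' : Char)].intercalate ((l.splitOn '.').take i))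
      ↔ (m ++ ['.']) <+: l := by
  constructor
  · rintro ⟨i, h1, h2, rfl⟩
    have hsplit : l = [('.' : Char)].intercalate (l.splitOn '.') := (List.intercalate_splitOn (xs := l) '.').symm
    have htk : (l.splitOn '.').take i ≠ [] := by
      have : ((l.splitOn '.').take i).length = i := by
        rw [List.length_take]; omega
      intro hnil; rw [hnil] at this; simp at this; omega
    have hdr : (l.splitOn '.').drop i ≠ [] := by
      have : ((l.splitOn '.').drop i).length = (l.splitOn '.').length - i := List.length_drop ..
      intro hnil; rw [hnil] at this; simp at this; omega
    refine ⟨[('.' : Char)].intercalate ((l.splitOn '.').drop i), ?_⟩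
    conv_rhs => rw [hsplit, ← List.take_append_drop i (l.splitOn '.')]
    rw [intercalate_append_nonempty '.' _ _ htk hdr]
    simp
  · rintro ⟨t, ht⟩
    have hl : l = m ++ '.' :: t := by rw [← ht]; simp
    have hsp : l.splitOn '.' = m.splitOn '.' ++ t.splitOn '.' := by
      rw [hl]
      exact List.splitOnP_append_cons (fun x => x == '.') m t '.' (by simp)
    refine ⟨(m.splitOn '.').length, ?_, ?_, ?_⟩
    · have := List.splitOnP_ne_nil (fun x => x == '.') m
      cases h : m.splitOn '.' with
      | nil => exact absurd h this
      | cons a b => simp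
    · rw [hsp, List.length_append]
      have := List.splitOnP_ne_nil (fun x => x == '.') t
      cases h : t.splitOn '.' with
      | nil => exact absurd h this
      | cons a b => simp
    · rw [hsp, List.take_left]
      exact (List.intercalate_splitOn (xs := m) '.').symm

theorem onetoList_id : (String.toList ∘ String.ofList) = id := funext (fun l => by simp)

theorem key_iff (p k : String) :
    (∃ idx ∈ PySem.List.pyRange 1 (((PySem.Chars.splitOn p.toList ['.']).map String.ofList).length : Int) 1,
        k = PySem.Str.join "." (PySem.List.slice ((PySem.Chars.splitOn p.toList ['.']).map String.ofList) none (some idx)))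
      ↔ (k.toList ++ ['.']) <+: p.toList := by
  rw [← core_prefix_iff]
  constructor
  · rintro ⟨idx, hmem, hk⟩
    rw [PySem.List.mem_pyRange_one] at hmem
    obtain ⟨h1, h2⟩ := hmem
    rw [PySem.List.slice_to _ (by omega)] at hk
    refine ⟨idx.toNat, by omega, ?_, ?_⟩
    · rw [pysem_splitOn_eq] at h2
      simp at h2
      omega
    · have h3 := congrArg String.toList hk
      rw [PySem.Str.toList_join] at h3
      rw [h3, pysem_splitOn_eq]
      simp [PySem.Chars.join, ← List.map_take, List.map_map, onetoList_id]
  · rintro ⟨i, h1, h2, hm⟩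
    refine ⟨(i : Int), ?_, ?_⟩
    · rw [PySem.List.mem_pyRange_one, pysem_splitOn_eq]
      simp
      omega
    · rw [PySem.List.slice_to _ (by omega)]
      apply String.toList_inj.mp
      rw [PySem.Str.toList_join, pysem_splitOn_eq]
      simp [PySem.Chars.join, ← List.map_take, List.map_map, onetoList_id]
      exact hm

theorem per_path (d : List (String × String)) (p : String) :
    (pyDictContains d p ||
      (let parts : List String := (PySem.Chars.splitOn p.toList ['.']).map String.ofList
       (PySem.List.pyRange 1 (parts.length : Int) 1).any (fun idx =>
         pyDictContains d (PySem.Str.join "." (PySem.List.slice parts none (some idx))))))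
      = d.any (fun kv => p == kv.1 || PySem.Str.startswith p (kv.1 ++ ".")) := by
  rw [Bool.eq_iff_iff]
  simp only [Bool.or_eq_true, List.any_eq_true, pyDictContains, beq_iff_eq,
    PySem.Str.startswith_eq, PySem.Chars.startswith_iff, String.toList_append]
  constructor
  · rintro (⟨kv, hkv, rfl⟩ | ⟨idx, hidx, kv, hkv, hk⟩)
    · exact ⟨kv, hkv, Or.inl rfl⟩
    · refine ⟨kv, hkv, Or.inr ?_⟩
      have := (key_iff p kv.1).mp ⟨idx, hidx, hk⟩
      simpa using this
  · rintro ⟨kv, hkv, h | h⟩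
    · exact Or.inl ⟨kv, hkv, h.symm⟩
    · right
      obtain ⟨idx, hidx, hk⟩ := (key_iff p kv.1).mpr (by simpa using h)
      exact ⟨idx, hidx, kv, hkv, hk⟩

-- ===== VERDICT (by name: the statement is the Claim_ definition above) =====
theorem is_feature_imported_py_spec : Claim_equal_is_feature_imported_py := by
  intro absolute_paths import_aliases _
  unfold Spec_is_feature_imported_py is_feature_imported_py is_feature_imported_py_alt
  congr 1
  funext p
  exact per_path import_aliases p
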